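-- pv_equiv track=rewrite | github.com/dylangoepel/dotfiles | res/bin/mm.py | countIndentationLevel
-- ===== SOURCE A (Python) =====
-- def countIndentationLevel(line):
--     count = 0
--     for character in line:
--         if character == ' ':
--             count += 1
--         elif character == '\t':
--             count += 4
--         else:
--             break
--     return count
-- ===== SOURCE B (Python) =====
-- from itertools import takewhile
--
-- def countIndentationLevel(line):
--     prefix = ''.join(takewhile(lambda c: c in ' \t', line))
--     return prefix.count(' ') + 4 * prefix.count('\t')
-- ===== Notes on version B (the rewrite author's own statement) =====
-- stated objective: idiomatic
-- what changed: B separates finding the whitespace prefix (takewhile) from weighted counting (two count passes over the prefix), instead of A's single accumulator loop with break.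
import Mathlib
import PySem

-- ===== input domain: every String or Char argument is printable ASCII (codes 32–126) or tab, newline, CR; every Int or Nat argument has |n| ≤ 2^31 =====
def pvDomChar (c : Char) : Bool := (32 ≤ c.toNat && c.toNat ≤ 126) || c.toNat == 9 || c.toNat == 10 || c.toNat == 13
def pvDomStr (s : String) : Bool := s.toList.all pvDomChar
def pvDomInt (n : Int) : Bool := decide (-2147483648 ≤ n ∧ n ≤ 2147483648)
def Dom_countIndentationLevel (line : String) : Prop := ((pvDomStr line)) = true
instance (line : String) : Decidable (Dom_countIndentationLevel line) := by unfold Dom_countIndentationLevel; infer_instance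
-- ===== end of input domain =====

-- B replaces A's single accumulator loop with break by takewhile-prefix extraction
-- followed by two weighted count passes (idiomatic decomposition; same cost).

-- ===== PORT A =====
-- A's for-loop with break: structural recursion carrying the count accumulator.
def countIndentationLevelLoop (cs : List Char) (count : Int) : Int :=
  match cs with
  | [] => count
  | c :: rest =>
    if c = ' ' then countIndentationLevelLoop rest (count + 1)
    else if c = '\t' then countIndentationLevelLoop rest (count + 4)
    else count

def countIndentationLevel (line : String) : Int :=
  countIndentationLevelLoop line.toList 0

-- ===== PORT B =====
-- Source B: prefix = takewhile(c in ' \t'); return prefix.count(' ') + 4 * prefix.count('\t')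
def countIndentationLevel_alt (line : String) : Int :=
  let pfx := line.toList.takeWhile (fun c => c = ' ' || c = '\t')
  (pfx.count ' ' : Int) + 4 * (pfx.count '\t' : Int)

-- ===== PRECONDITION & SPEC =====
def Spec_countIndentationLevel (line : String) (out : Int) : Prop := out = countIndentationLevel_alt line
instance (line : String) (out : Int) : Decidable (Spec_countIndentationLevel line out) := by unfold Spec_countIndentationLevel; infer_instance

-- ===== CLAIM (what is proved, stated in full; the proofs are below) =====
def Claim_equal_countIndentationLevel : Prop := ∀ (line : String), Dom_countIndentationLevel line → Spec_countIndentationLevel line (countIndentationLevel line)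

-- ===== LEMMAS AND PROOFS =====
theorem countIndentationLevelLoop_eq (cs : List Char) (count : Int) :
    countIndentationLevelLoop cs count =
      count + ((cs.takeWhile (fun c => c = ' ' || c = '\t')).count ' ' : Int)
            + 4 * ((cs.takeWhile (fun c => c = ' ' || c = '\t')).count '\t' : Int) := by
  induction cs generalizing count with
  | nil => simp [countIndentationLevelLoop]
  | cons c rest ih =>
    by_cases hs : c = ' '
    · subst hs
      simp [countIndentationLevelLoop, List.takeWhile, ih]
      ring
    · by_cases ht : c = '\t'
      · subst ht
        simp [countIndentationLevelLoop, List.takeWhile, ih]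
        ring
      · simp [countIndentationLevelLoop, hs, ht, List.takeWhile]

-- ===== VERDICT (by name: the statement is the Claim_ definition above) =====
theorem countIndentationLevel_spec : Claim_equal_countIndentationLevel := by
  intro line _
  unfold Spec_countIndentationLevel countIndentationLevel countIndentationLevel_alt
  rw [countIndentationLevelLoop_eq]
  ring
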